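-- pv_equiv track=rewrite | github.com/andreasvc/adventofcode | 2015/adventofcode.py | day3
-- ===== SOURCE A (Python) =====
-- def day3(s):
-- 	x = y = 0
-- 	seen = {(0, 0)}
-- 	for a in s:
-- 		if a == '^':
-- 			y -= 1
-- 		elif a == 'v':
-- 			y += 1
-- 		elif a == '<':
-- 			x -= 1
-- 		elif a == '>':
-- 			x += 1
-- 		seen.add((x, y))
-- 	return seen
-- ===== SOURCE B (Python) =====
-- MOVES = {'^': (0, -1), 'v': (0, 1), '<': (-1, 0), '>': (1, 0)}
--
-- def day3(s):
-- 	# Divide and conquer: visited(L + R) = visited(L) | (endpoint(L) + visited(R)),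
-- 	# with the endpoint of a block computed directly from character counts.
-- 	if len(s) <= 1:
-- 		return {(0, 0), MOVES.get(s, (0, 0))} if s else {(0, 0)}
-- 	m = len(s) // 2
-- 	left, right = s[:m], s[m:]
-- 	ex = left.count('>') - left.count('<')
-- 	ey = left.count('v') - left.count('^')
-- 	return day3(left) | {(ex + x, ey + y) for x, y in day3(right)}
-- ===== Notes on version B (the rewrite author's own statement) =====
-- stated objective: alternative
-- what changed: B replaces A's single left-to-right scan mutating x/y with a divide-and-conquer recursion: split the string in half, recurse on each half, compute the left half's endpoint directly from character counts, and union the left set with the translated right set.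
import Mathlib
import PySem

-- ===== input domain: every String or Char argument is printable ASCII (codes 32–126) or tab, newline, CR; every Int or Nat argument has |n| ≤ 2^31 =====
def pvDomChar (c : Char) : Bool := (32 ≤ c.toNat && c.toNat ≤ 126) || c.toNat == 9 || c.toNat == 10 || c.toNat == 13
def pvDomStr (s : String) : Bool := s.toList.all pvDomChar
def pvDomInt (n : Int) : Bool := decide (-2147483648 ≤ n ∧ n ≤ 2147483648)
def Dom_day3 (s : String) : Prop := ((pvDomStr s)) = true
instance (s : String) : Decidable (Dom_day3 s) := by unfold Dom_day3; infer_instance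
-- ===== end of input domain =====

-- B re-solves the task by divide and conquer (split, recurse, translate, union) instead of A's single scan; equal return values proved below.

-- ===== PORT A =====
-- one loop iteration of A: branch ladder updating x, y, then seen.add((x, y))
def day3Step (st : Int × Int × PySem.Set (Int × Int)) (a : Char) :
    Int × Int × PySem.Set (Int × Int) :=
  let xy : Int × Int :=
    if a = '^' then (st.1, st.2.1 - 1)
    else if a = 'v' then (st.1, st.2.1 + 1)
    else if a = '<' then (st.1 - 1, st.2.1)
    else if a = '>' then (st.1 + 1, st.2.1)
    else (st.1, st.2.1)
  (xy.1, xy.2, PySem.Set.add st.2.2 (xy.1, xy.2))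

def day3 (s : String) : List (Int × Int) :=
  (s.toList.foldl day3Step ((0 : Int), (0 : Int), PySem.Set.ofList [((0 : Int), (0 : Int))])).2.2

-- ===== PORT B =====
def day3Moves : PySem.Dict Char (Int × Int) :=
  PySem.Dict.mk [('^', (0, -1)), ('v', (0, 1)), ('<', (-1, 0)), ('>', (1, 0))]

-- B's recursion; s[:m] / s[m:] (nonnegative m ≤ len) are List.take / List.drop, exact here
def day3Vis (t : List Char) : PySem.Set (Int × Int) :=
  if h2 : 2 ≤ t.length then
    let m := t.length / 2
    let left := t.take m
    let right := t.drop m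
    let ex : Int := (left.count '>' : Int) - (left.count '<' : Int)
    let ey : Int := (left.count 'v' : Int) - (left.count '^' : Int)
    PySem.Set.union (day3Vis left)
      ((day3Vis right).map (fun p => (ex + p.1, ey + p.2)))
  else
    match t with
    | [] => PySem.Set.ofList [((0 : Int), (0 : Int))]
    | c :: _ => PySem.Set.ofList [((0 : Int), (0 : Int)), PySem.Dict.getD day3Moves c (0, 0)]
termination_by t.length
decreasing_by
  · simpa [List.length_take] using by omega
  · simp [List.length_drop]; omega

def day3_alt (s : String) : List (Int × Int) := day3Vis s.toList

-- ===== PRECONDITION & SPEC =====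
def Spec_day3 (s : String) (out : List (Int × Int)) : Prop := out = day3_alt s
instance (s : String) (out : List (Int × Int)) : Decidable (Spec_day3 s out) := by unfold Spec_day3; infer_instance

-- ===== CLAIM (what is proved, stated in full; the proofs are below) =====
def Claim_equal_day3 : Prop := ∀ (s : String), Dom_day3 s → Spec_day3 s (day3 s)

-- ===== LEMMAS AND PROOFS =====

-- the displacement of one character (proof-side abbreviation)
def d3delta (c : Char) : Int × Int :=
  if c = '^' then (0, -1)
  else if c = 'v' then (0, 1)
  else if c = '<' then (-1, 0)
  else if c = '>' then (1, 0)
  else (0, 0)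

-- positions visited after each step of cs, starting from (x, y) (start excluded)
def d3visits : List Char → Int → Int → List (Int × Int)
  | [], _, _ => []
  | c :: cs, x, y =>
      (x + (d3delta c).1, y + (d3delta c).2) ::
        d3visits cs (x + (d3delta c).1) (y + (d3delta c).2)

-- endpoint after walking cs from (x, y)
def d3end (cs : List Char) (x y : Int) : Int × Int :=
  cs.foldl (fun p c => (p.1 + (d3delta c).1, p.2 + (d3delta c).2)) (x, y)

lemma d3_getD_eq (c : Char) :
    PySem.Dict.getD day3Moves c ((0 : Int), (0 : Int)) = d3delta c := by
  by_cases h1 : c = '^' <;> by_cases h2 : c = 'v' <;> by_cases h3 : c = '<' <;>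
    by_cases h4 : c = '>' <;>
    simp_all [day3Moves, d3delta, PySem.Dict.getD_eq_get?_getD,
      Ne.symm, PySem.Dict.get?]

lemma d3_fold_eq (cs : List Char) (x y : Int) (S : PySem.Set (Int × Int)) :
    (cs.foldl day3Step (x, y, S)).2.2 = PySem.Set.update S (d3visits cs x y) := by
  induction cs generalizing x y S with
  | nil => rfl
  | cons c cs ih =>
    have hstep : day3Step (x, y, S) c
        = (x + (d3delta c).1, y + (d3delta c).2,
           PySem.Set.add S (x + (d3delta c).1, y + (d3delta c).2)) := by
      by_cases h1 : c = '^' <;> by_cases h2 : c = 'v' <;> by_cases h3 : c = '<' <;>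
        by_cases h4 : c = '>' <;> simp_all [day3Step, d3delta, sub_eq_add_neg]
    simp only [List.foldl_cons, hstep, d3visits, PySem.Set.update_cons, ih]

lemma d3visits_translate (cs : List Char) (a b x y : Int) :
    d3visits cs (a + x) (b + y)
      = (d3visits cs x y).map (fun p => (a + p.1, b + p.2)) := by
  induction cs generalizing x y with
  | nil => rfl
  | cons c cs ih =>
    simp only [d3visits, List.map_cons, add_assoc, ih]

lemma d3visits_append (u v : List Char) (x y : Int) :
    d3visits (u ++ v) x y
      = d3visits u x y ++ d3visits v (d3end u x y).1 (d3end u x y).2 := by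
  induction u generalizing x y with
  | nil => rfl
  | cons c u ih => simp only [List.cons_append, d3visits, d3end, List.foldl_cons, ih]

lemma d3end_mem (u : List Char) (x y : Int) :
    d3end u x y ∈ (x, y) :: d3visits u x y := by
  induction u generalizing x y with
  | nil => simp [d3end]
  | cons c u ih =>
    have := ih (x + (d3delta c).1) (y + (d3delta c).2)
    simp only [d3end, List.foldl_cons] at *
    simp only [d3visits, List.mem_cons] at this ⊢
    tauto

lemma d3end_counts (u : List Char) (x y : Int) :
    d3end u x y = (x + (u.count '>' : Int) - (u.count '<' : Int),
                   y + (u.count 'v' : Int) - (u.count '^' : Int)) := by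
  induction u generalizing x y with
  | nil => simp [d3end]
  | cons c u ih =>
    simp only [d3end, List.foldl_cons] at *
    rw [ih]
    by_cases h1 : c = '^' <;> by_cases h2 : c = 'v' <;> by_cases h3 : c = '<' <;>
      by_cases h4 : c = '>' <;>
      simp_all [d3delta, Prod.ext_iff] <;> omega

lemma d3_ofList_map_ofList {α β : Type} [BEq α] [LawfulBEq α] [BEq β] [LawfulBEq β]
    (f : α → β) (l : List α) :
    PySem.Set.ofList ((PySem.Set.ofList l).map f) = PySem.Set.ofList (l.map f) := by
  induction l using List.reverseRecOn with
  | nil => rfl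
  | append_singleton l x ih =>
    rw [PySem.Set.ofList_append_singleton, List.map_append, List.map_singleton,
      PySem.Set.ofList_append_singleton, ← ih]
    by_cases hx : x ∈ PySem.Set.ofList l
    · rw [PySem.Set.add_of_mem hx, PySem.Set.add_of_mem]
      rw [PySem.Set.mem_ofList]
      exact List.mem_map_of_mem hx
    · rw [PySem.Set.add_of_not_mem hx, List.map_append, List.map_singleton,
        PySem.Set.ofList_append_singleton]

lemma d3_update_ofList {α : Type} [BEq α] [LawfulBEq α] (s : PySem.Set α) (l : List α) :
    PySem.Set.update s (PySem.Set.ofList l) = PySem.Set.update s l := by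
  rw [PySem.Set.update_eq_append_filter, PySem.Set.update_eq_append_filter,
    PySem.Set.ofList_ofList]

lemma d3_update_cons_mem {α : Type} [BEq α] [LawfulBEq α] (s : PySem.Set α) (x : α)
    (l : List α) (hx : x ∈ s) :
    PySem.Set.update s (x :: l) = PySem.Set.update s l := by
  rw [PySem.Set.update_cons, PySem.Set.add_of_mem hx]

-- main invariant: B's recursive set equals the set of all positions in first-visit order
lemma d3Vis_eq : ∀ (n : Nat) (cs : List Char), cs.length ≤ n →
    day3Vis cs = PySem.Set.ofList (((0 : Int), (0 : Int)) :: d3visits cs 0 0) := by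
  intro n
  induction n with
  | zero =>
    intro cs h
    have : cs = [] := List.eq_nil_of_length_eq_zero (Nat.le_zero.mp h)
    subst this; rw [day3Vis]; rfl
  | succ n ih =>
    intro cs hlen
    by_cases h2 : 2 ≤ cs.length
    · rw [day3Vis, dif_pos h2]
      show PySem.Set.union (day3Vis (cs.take (cs.length / 2)))
          ((day3Vis (cs.drop (cs.length / 2))).map
            (fun p => ((((cs.take (cs.length / 2)).count '>' : Int)
                          - ((cs.take (cs.length / 2)).count '<' : Int)) + p.1,
                       (((cs.take (cs.length / 2)).count 'v' : Int)
                          - ((cs.take (cs.length / 2)).count '^' : Int)) + p.2)))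
        = PySem.Set.ofList (((0 : Int), (0 : Int)) :: d3visits cs 0 0)
      set m := cs.length / 2 with hm
      have hm1 : 1 ≤ m := by omega
      have hmlt : m < cs.length := by omega
      have htake : (cs.take m).length = m := by simp; omega
      have hdrop : (cs.drop m).length = cs.length - m := by simp
      have hL := ih (cs.take m) (by omega)
      have hR := ih (cs.drop m) (by omega)
      rw [hL, hR]
      -- abbreviations
      set L := cs.take m
      set R := cs.drop m
      set ex : Int := (L.count '>' : Int) - (L.count '<' : Int) with hex
      set ey : Int := (L.count 'v' : Int) - (L.count '^' : Int) with hey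
      set f : Int × Int → Int × Int := fun p => (ex + p.1, ey + p.2) with hf
      have hend : d3end L 0 0 = (ex, ey) := by
        rw [d3end_counts]; simp [hex, hey]
      have hsplit : cs = L ++ R := (List.take_append_drop m cs).symm
      -- left side: one list of all positions
      have hlhs : (((0 : Int), (0 : Int)) :: d3visits cs 0 0)
          = (((0 : Int), (0 : Int)) :: d3visits L 0 0) ++ (d3visits R 0 0).map f := by
        rw [hsplit, d3visits_append, hend]
        have ht := d3visits_translate R ex ey 0 0
        simp only [add_zero] at ht
        rw [ht, hf]
        exact List.cons_append.symm
      have hmem : f ((0 : Int), (0 : Int)) ∈ PySem.Set.ofList (((0:Int),(0:Int)) :: d3visits L 0 0) := by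
        rw [PySem.Set.mem_ofList]
        have := d3end_mem L 0 0
        rw [hend] at this
        simpa [hf] using this
      rw [hlhs, PySem.Set.ofList_append]
      show PySem.Set.update (PySem.Set.ofList (((0:Int),(0:Int)) :: d3visits L 0 0))
          ((PySem.Set.ofList (((0:Int),(0:Int)) :: d3visits R 0 0)).map f)
        = PySem.Set.update (PySem.Set.ofList (((0:Int),(0:Int)) :: d3visits L 0 0))
            ((d3visits R 0 0).map f)
      rw [← d3_update_ofList _ ((PySem.Set.ofList (((0:Int),(0:Int)) :: d3visits R 0 0)).map f),
        d3_ofList_map_ofList, d3_update_ofList, List.map_cons,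
        d3_update_cons_mem _ _ _ hmem]
    · -- short cases
      match cs with
      | [] => rw [day3Vis]; rfl
      | [c] =>
        rw [day3Vis]
        norm_num [d3visits, d3_getD_eq]
      | _ :: _ :: _ => simp at h2

-- ===== VERDICT (by name: the statement is the Claim_ definition above) =====
theorem day3_spec : Claim_equal_day3 := by
  intro s _
  unfold Spec_day3 day3 day3_alt
  rw [d3_fold_eq, d3Vis_eq s.toList.length s.toList le_rfl,
    show (((0:Int),(0:Int)) :: d3visits s.toList 0 0)
        = [((0:Int),(0:Int))] ++ d3visits s.toList 0 0 from rfl,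
    PySem.Set.ofList_append]
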